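-- pv_equiv track=rewrite | github.com/Himani2506/YTEYWA | skills/youtube-summarizer/scripts/process_video.py | segment_into_topics
-- ===== SOURCE A (Python) =====
-- MIN_TOPIC_WINDOWS         = 3      # Minimum windows per topic segment
--
-- def segment_into_topics(windows: list, boundaries: list[int]) -> list[list[dict]]:
--     """
--     Split windows into topic segments using detected boundaries.
--     Ensures minimum segment size.
--     """
--     if not boundaries:
--         return [windows]
--
--     segments = []
--     prev = 0
--     for boundary in boundaries:
--         segment = windows[prev:boundary]
--         if len(segment) >= MIN_TOPIC_WINDOWS:
--             segments.append(segment)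
--         elif segments:
--             # Merge tiny segment into previous
--             segments[-1].extend(segment)
--         else:
--             segments.append(segment)
--         prev = boundary
--
--     # Last segment
--     last = windows[prev:]
--     if last:
--         if len(last) < MIN_TOPIC_WINDOWS and segments:
--             segments[-1].extend(last)
--         else:
--             segments.append(last)
--
--     return segments
-- ===== SOURCE B (Python) =====
-- MIN_TOPIC_WINDOWS = 3      # Minimum windows per topic segment
--
-- def segment_into_topics(windows: list, boundaries: list[int]) -> list[list[dict]]:
--     """
--     Split windows into topic segments using detected boundaries.
--     Ensures minimum segment size.
--     """
--     if not boundaries: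
--         return [windows]
--
--     # Stage 1: materialise every cut interval's slice; an empty trailing
--     # slice contributes nothing and is dropped.
--     starts = [0] + boundaries
--     ends = boundaries + [len(windows)]
--     raw = [windows[s:e] for s, e in zip(starts, ends)]
--     pieces = raw if raw[-1] else raw[:-1]
--
--     # Stage 2: span grouping with a cursor — each output segment is one piece
--     # plus the run of following sub-minimum pieces, flattened in one go.
--     # The result is never revisited or mutated after a segment is emitted.
--     res = []
--     i = 0
--     while i < len(pieces):
--         group = [pieces[i]]
--         i += 1
--         while i < len(pieces) and len(pieces[i]) < MIN_TOPIC_WINDOWS: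
--             group.append(pieces[i])
--             i += 1
--         res.append([w for p in group for w in p])
--     return res
-- ===== Notes on version B (the rewrite author's own statement) =====
-- stated objective: alternative
-- what changed: A is a single pass that appends each slice or mutates result[-1] to merge a tiny slice into the previous segment; B first materialises all cut-interval slices (dropping an empty trailing one), then groups them by spans with a cursor: each output segment is one piece plus the following run of sub-minimum pieces, flattened wholesale, so the result list is never revisited after a segment is emitted.
import Mathlib
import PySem

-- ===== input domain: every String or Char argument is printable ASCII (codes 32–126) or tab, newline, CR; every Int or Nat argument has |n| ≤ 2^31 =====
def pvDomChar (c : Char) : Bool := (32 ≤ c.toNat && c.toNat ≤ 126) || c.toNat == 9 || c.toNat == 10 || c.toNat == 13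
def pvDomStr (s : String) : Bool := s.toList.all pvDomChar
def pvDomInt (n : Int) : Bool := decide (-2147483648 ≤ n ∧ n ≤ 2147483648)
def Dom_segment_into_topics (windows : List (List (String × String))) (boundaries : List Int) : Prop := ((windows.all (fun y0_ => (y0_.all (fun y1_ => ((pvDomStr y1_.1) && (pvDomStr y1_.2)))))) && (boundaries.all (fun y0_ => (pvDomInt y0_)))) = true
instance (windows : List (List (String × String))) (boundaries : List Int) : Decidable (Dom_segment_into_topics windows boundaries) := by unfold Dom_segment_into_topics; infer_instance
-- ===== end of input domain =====

-- B replaces A's single pass that merges tiny slices into result[-1] by a staged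
-- algorithm: slice all cut intervals up front, then span-group the pieces with a
-- cursor ('alternative' objective, same cost); return values agree (A mutates only
-- its own fresh slices, never its arguments).

-- segments[-1].extend(segment): replace the last element by itself ++ segment
def setLastAppend {α : Type} (segs : List (List α)) (seg : List α) : List (List α) :=
  match segs with
  | [] => []
  | [x] => [x ++ seg]
  | x :: xs => x :: setLastAppend xs seg

-- ===== PORT A =====
def segment_into_topics (windows : List (List (String × String))) (boundaries : List Int) : List (List (List (String × String))) :=
  if boundaries = [] then [windows]
  else
    let st := boundaries.foldl
      (fun (acc : List (List (List (String × String))) × Int) (boundary : Int) =>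
        let segment := PySem.List.slice windows (some acc.2) (some boundary)
        let segments :=
          if 3 ≤ segment.length then acc.1 ++ [segment]
          else if acc.1 ≠ [] then setLastAppend acc.1 segment
          else acc.1 ++ [segment]
        (segments, boundary))
      ([], 0)
    let last := PySem.List.slice windows (some st.2) none
    if last ≠ [] then
      if last.length < 3 ∧ st.1 ≠ [] then setLastAppend st.1 last
      else st.1 ++ [last]
    else st.1

-- ===== PORT B =====
-- Source B's stage-2 cursor loop: emit one piece plus the following run of
-- sub-minimum pieces, flattened, then continue after that run
def bBuild (pieces : List (List (List (String × String)))) : List (List (List (String × String))) :=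
  match pieces with
  | [] => []
  | p :: rest =>
      (p :: rest.takeWhile (fun s => s.length < 3)).flatten ::
        bBuild (rest.dropWhile (fun s => s.length < 3))
termination_by pieces.length
decreasing_by
  have := List.length_dropWhile_le (fun s : List (List (String × String)) => s.length < 3) rest
  simp; omega

def segment_into_topics_alt (windows : List (List (String × String))) (boundaries : List Int) : List (List (List (String × String))) :=
  if boundaries = [] then [windows]
  else
    let raw := ((0 :: boundaries).zip (boundaries ++ [(windows.length : Int)])).map
        (fun c => PySem.List.slice windows (some c.1) (some c.2))
    -- raw[-1]: raw is nonempty here (boundaries ≠ []), so getLastD [] is exact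
    let pieces := if raw.getLastD [] ≠ [] then raw else raw.dropLast
    bBuild pieces

-- ===== PRECONDITION & SPEC =====
def Spec_segment_into_topics (windows : List (List (String × String))) (boundaries : List Int) (out : List (List (List (String × String)))) : Prop := out = segment_into_topics_alt windows boundaries
instance (windows : List (List (String × String))) (boundaries : List Int) (out : List (List (List (String × String)))) : Decidable (Spec_segment_into_topics windows boundaries out) := by unfold Spec_segment_into_topics; infer_instance

-- ===== CLAIM (what is proved, stated in full; the proofs are below) =====
def Claim_equal_segment_into_topics : Prop := ∀ (windows : List (List (String × String))) (boundaries : List Int), Dom_segment_into_topics windows boundaries → Spec_segment_into_topics windows boundaries (segment_into_topics windows boundaries)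

-- ===== LEMMAS AND PROOFS =====

-- A's loop as a structural recursion carrying (segments, prev), tail handling in the base case
def Aloop (windows : List (List (String × String))) (segs : List (List (List (String × String)))) (prev : Int) : List Int → List (List (List (String × String)))
  | [] =>
      let last := PySem.List.slice windows (some prev) none
      if last ≠ [] then
        if last.length < 3 ∧ segs ≠ [] then setLastAppend segs last
        else segs ++ [last]
      else segs
  | b :: bs =>
      let segment := PySem.List.slice windows (some prev) (some b)
      Aloop windows
        (if 3 ≤ segment.length then segs ++ [segment]
         else if segs ≠ [] then setLastAppend segs segment
         else segs ++ [segment]) b bs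

-- proof-side uniform step: A's append-or-merge decision as one function
def bPlace (result : List (List (List (String × String)))) (seg : List (List (String × String))) : List (List (List (String × String))) :=
  if 3 ≤ seg.length ∨ result = [] then result ++ [seg] else setLastAppend result seg

lemma getLastD_indep {α : Type} (l : List α) (d d' : α) (h : l ≠ []) : l.getLastD d = l.getLastD d' := by
  rw [List.getLastD_eq_getLast?, List.getLastD_eq_getLast?]
  obtain ⟨x, hx⟩ := List.getLast?_isSome.mpr h |> Option.isSome_iff_exists.mp
  simp [hx]

lemma bPlace_eq_branchA (segs : List (List (List (String × String)))) (seg : List (List (String × String))) :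
    bPlace segs seg =
      if 3 ≤ seg.length then segs ++ [seg]
      else if segs ≠ [] then setLastAppend segs seg
      else segs ++ [seg] := by
  by_cases hs : segs = [] <;> by_cases hl : 3 ≤ seg.length <;>
    simp [bPlace, hs, hl]

lemma bPlace_eq_tailA (segs : List (List (List (String × String)))) (seg : List (List (String × String))) :
    bPlace segs seg =
      if seg.length < 3 ∧ segs ≠ [] then setLastAppend segs seg
      else segs ++ [seg] := by
  by_cases hs : segs = [] <;> by_cases hl : 3 ≤ seg.length <;>
    simp [bPlace, hs, hl, Nat.not_lt.mpr, Nat.lt_of_not_le]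

-- A's foldl-plus-tail equals Aloop, any start state
lemma foldlA_eq_Aloop (windows : List (List (String × String))) (bs : List Int)
    (segs : List (List (List (String × String)))) (prev : Int) :
    (let st := bs.foldl
      (fun (acc : List (List (List (String × String))) × Int) (boundary : Int) =>
        let segment := PySem.List.slice windows (some acc.2) (some boundary)
        let segments :=
          if 3 ≤ segment.length then acc.1 ++ [segment]
          else if acc.1 ≠ [] then setLastAppend acc.1 segment
          else acc.1 ++ [segment]
        (segments, boundary))
      (segs, prev)
     let last := PySem.List.slice windows (some st.2) none
     if last ≠ [] then
       if last.length < 3 ∧ st.1 ≠ [] then setLastAppend st.1 last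
       else st.1 ++ [last]
     else st.1) = Aloop windows segs prev bs := by
  induction bs generalizing segs prev with
  | nil => simp [Aloop]
  | cons b bs ih => simpa [Aloop, List.foldl_cons] using ih _ b

lemma raw_ne_nil (windows : List (List (String × String))) (prev : Int) (bs : List Int) :
    ((prev :: bs).zip (bs ++ [(windows.length : Int)])).map
      (fun c => PySem.List.slice windows (some c.1) (some c.2)) ≠ [] := by
  apply List.ne_nil_of_length_pos
  simp [List.length_zip]

-- the uniform-merge pass over all pieces equals Aloop, any start state
lemma midB_eq_Aloop (windows : List (List (String × String))) (bs : List Int)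
    (segs : List (List (List (String × String)))) (prev : Int) :
    (let raw := ((prev :: bs).zip (bs ++ [(windows.length : Int)])).map
        (fun c => PySem.List.slice windows (some c.1) (some c.2))
     let result := raw.dropLast.foldl bPlace segs
     let tail := raw.getLastD []
     if tail ≠ [] then bPlace result tail else result) = Aloop windows segs prev bs := by
  induction bs generalizing segs prev with
  | nil =>
    have hfull : PySem.List.slice windows (some prev) (some (windows.length : Int))
        = PySem.List.slice windows (some prev) none := by
      simp [PySem.List.slice]
    simp only [List.nil_append, List.zip_cons_cons, List.zip_nil_right, List.map,
      List.dropLast, List.foldl_nil, List.getLastD, Aloop, hfull, bPlace_eq_tailA,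
      List.getLast_singleton]
  | cons b bs ih =>
    have hrest := raw_ne_nil windows b bs
    simp only [List.cons_append, List.zip_cons_cons, List.map_cons, Aloop]
    rw [List.dropLast_cons_of_ne_nil hrest, List.foldl_cons, List.getLastD_cons,
      getLastD_indep _ _ [] hrest, ← bPlace_eq_branchA]
    exact ih (bPlace segs (PySem.List.slice windows (some prev) (some b))) b

lemma setLastAppend_nil_right {α : Type} (segs : List (List α)) :
    setLastAppend segs [] = segs := by
  induction segs with
  | nil => rfl
  | cons x xs ih => cases xs <;> simp_all [setLastAppend]

lemma setLastAppend_ne_nil {α : Type} (l : List (List α)) (q : List α) (h : l ≠ []) :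
    setLastAppend l q ≠ [] := by
  cases l with
  | nil => exact absurd rfl h
  | cons x xs => cases xs <;> simp [setLastAppend]

lemma setLastAppend_cons_of_ne_nil {α : Type} (x : List α) (l : List (List α)) (q : List α)
    (h : l ≠ []) : setLastAppend (x :: l) q = x :: setLastAppend l q := by
  cases l with
  | nil => exact absurd rfl h
  | cons y ys => rfl

lemma setLastAppend_setLastAppend {α : Type} (segs : List (List α)) (p q : List α) :
    setLastAppend (setLastAppend segs p) q = setLastAppend segs (p ++ q) := by
  induction segs with
  | nil => rfl
  | cons x xs ih =>
    cases xs with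
    | nil => simp [setLastAppend]
    | cons y ys =>
      rw [setLastAppend_cons_of_ne_nil x (y::ys) p (by simp),
        setLastAppend_cons_of_ne_nil x _ q (setLastAppend_ne_nil _ _ (by simp)),
        setLastAppend_cons_of_ne_nil x (y::ys) (p ++ q) (by simp), ih]

lemma setLastAppend_append_singleton {α : Type} (acc : List (List α)) (x q : List α) :
    setLastAppend (acc ++ [x]) q = acc ++ [x ++ q] := by
  induction acc with
  | nil => rfl
  | cons a as ih =>
    rw [List.cons_append, setLastAppend_cons_of_ne_nil a _ q (by simp), ih, List.cons_append]

lemma bBuild_nil : bBuild [] = [] := by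
  conv_lhs => rw [bBuild.eq_def]

lemma bBuild_cons (p : List (List (String × String))) (rest : List (List (List (String × String)))) :
    bBuild (p :: rest) =
      (p :: rest.takeWhile (fun s => s.length < 3)).flatten ::
        bBuild (rest.dropWhile (fun s => s.length < 3)) := by
  conv_lhs => rw [bBuild.eq_def]

-- key invariant: with a nonempty accumulator, the uniform-merge fold first absorbs
-- the run of small pieces into the last segment, then span-grouping takes over
lemma foldl_bPlace_nonempty (pieces : List (List (List (String × String))))
    (acc : List (List (List (String × String)))) (h : acc ≠ []) :
    pieces.foldl bPlace acc =
      setLastAppend acc (pieces.takeWhile (fun s => s.length < 3)).flatten ++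
        bBuild (pieces.dropWhile (fun s => s.length < 3)) := by
  induction pieces generalizing acc with
  | nil => simp [bBuild_nil, setLastAppend_nil_right]
  | cons p rest ih =>
    by_cases hp : p.length < 3
    · have hstep : bPlace acc p = setLastAppend acc p := by
        simp [bPlace, h, Nat.not_le.mpr hp]
      have hne : setLastAppend acc p ≠ [] := by
        cases acc with
        | nil => exact absurd rfl h
        | cons x xs => cases xs <;> simp [setLastAppend]
      rw [List.foldl_cons, hstep, ih _ hne]
      simp [hp, setLastAppend_setLastAppend]
    · have hstep : bPlace acc p = acc ++ [p] := by
        simp [bPlace, Nat.le_of_not_lt hp]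
      have hne : acc ++ [p] ≠ [] := by simp
      have htk : (p :: rest).takeWhile (fun s => s.length < 3) = [] := by
        simp [hp]
      have hdw : (p :: rest).dropWhile (fun s => s.length < 3) = p :: rest := by
        simp [hp]
      rw [List.foldl_cons, hstep, ih _ hne, setLastAppend_append_singleton, htk, hdw,
        bBuild_cons]
      simp [setLastAppend_nil_right]

-- Source B's cursor loop computes exactly the uniform-merge fold from the empty result
lemma foldl_bPlace_eq_bBuild (pieces : List (List (List (String × String)))) :
    pieces.foldl bPlace [] = bBuild pieces := by
  cases pieces with
  | nil => rw [List.foldl_nil, bBuild_nil]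
  | cons p rest =>
    have hstep : bPlace [] p = [p] := by simp [bPlace]
    rw [List.foldl_cons, hstep, foldl_bPlace_nonempty _ _ (by simp), bBuild_cons]
    simp [setLastAppend]

lemma dropLast_concat_getLastD {α : Type} (l : List α) (d : α) (h : l ≠ []) :
    l.dropLast ++ [l.getLastD d] = l := by
  have hd : l.getLastD d = l.getLast h := by
    rw [List.getLastD_eq_getLast?, List.getLast?_eq_some_getLast h]
    rfl
  rw [hd, List.dropLast_concat_getLast h]

lemma portA_eq (windows : List (List (String × String))) (boundaries : List Int) (h : boundaries ≠ []) :
    segment_into_topics windows boundaries = Aloop windows [] 0 boundaries := by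
  rw [segment_into_topics, if_neg h]
  exact foldlA_eq_Aloop windows boundaries [] 0

lemma portB_eq (windows : List (List (String × String))) (boundaries : List Int) (h : boundaries ≠ []) :
    segment_into_topics_alt windows boundaries = Aloop windows [] 0 boundaries := by
  rw [segment_into_topics_alt, if_neg h]
  rw [← midB_eq_Aloop windows boundaries [] 0]
  cases boundaries with
  | nil => exact absurd rfl h
  | cons b bs =>
    simp only []
    set raw := ((0 :: b :: bs).zip ((b :: bs) ++ [(windows.length : Int)])).map
        (fun c => PySem.List.slice windows (some c.1) (some c.2)) with hraw
    have hne : raw ≠ [] := raw_ne_nil windows 0 (b :: bs)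
    by_cases ht : raw.getLastD [] ≠ []
    · rw [if_pos ht, if_pos ht, ← foldl_bPlace_eq_bBuild raw]
      conv_lhs => rw [← dropLast_concat_getLastD raw [] hne]
      rw [List.foldl_append]
      rfl
    · rw [if_neg ht, if_neg ht, ← foldl_bPlace_eq_bBuild]

-- ===== VERDICT (by name: the statement is the Claim_ definition above) =====
theorem segment_into_topics_spec : Claim_equal_segment_into_topics := by
  intro windows boundaries _
  unfold Spec_segment_into_topics
  by_cases h : boundaries = []
  · simp [segment_into_topics, segment_into_topics_alt, h]
  · rw [portA_eq windows boundaries h, portB_eq windows boundaries h]
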